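-- pv_equiv track=rewrite | github.com/BogdanovicMilos/raven-pack | alphabet_soup.py | search_bowl
-- ===== SOURCE A (Python) =====
-- def search_bowl(letters, bowl):
--     """ using recursion to search the bowl """
--     if len(letters) == 0:
--         return True
--
--     if letters[0] not in bowl:
--         return False
--     else:
--         bowl.index(letters[0])
--         remaining = letters[1:]
--         """ recalling the function by removing the already checked letters """
--         return search_bowl(remaining, bowl)
-- ===== SOURCE B (Python) =====
-- def search_bowl(letters, bowl):
--     """ iterate once over letters; False on the first letter missing from bowl """
--     return all(letter in bowl for letter in letters)
-- ===== Notes on version B (the rewrite author's own statement) =====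
-- stated objective: idiomatic
-- what changed: Replaced the tail recursion (with a dead bowl.index call and repeated letters[1:] slicing) by a single flat all(...) generator pass over letters, removing the O(n^2) slicing.
import Mathlib
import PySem

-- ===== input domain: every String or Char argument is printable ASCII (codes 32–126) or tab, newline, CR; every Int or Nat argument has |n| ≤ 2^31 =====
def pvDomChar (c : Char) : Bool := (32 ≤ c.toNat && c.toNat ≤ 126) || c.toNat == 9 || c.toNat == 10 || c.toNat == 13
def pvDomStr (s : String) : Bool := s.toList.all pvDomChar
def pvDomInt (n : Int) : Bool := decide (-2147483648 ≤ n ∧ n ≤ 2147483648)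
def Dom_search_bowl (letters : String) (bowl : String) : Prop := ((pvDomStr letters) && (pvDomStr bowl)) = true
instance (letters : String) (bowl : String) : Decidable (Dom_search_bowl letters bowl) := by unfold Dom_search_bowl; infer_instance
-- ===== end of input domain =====

-- B replaces A's recursion (with its dead bowl.index call and letters[1:] slicing) by one flat all(...) pass; return values agree everywhere.
-- ===== PORT A =====
-- recursion of A over the characters of letters; 'letters[0] not in bowl' is a char-membership test,
-- 'bowl.index(letters[0])' only runs when the char is present, so it never raises (dead value).
def searchBowlRec : List Char → List Char → Bool
  | [], _ => true
  | c :: rest, bowl =>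
      if !(bowl.contains c) then false
      else
        -- bowl.index(letters[0]) : value discarded; cannot raise since c ∈ bowl here
        searchBowlRec rest bowl

def search_bowl (letters : String) (bowl : String) : Bool :=
  searchBowlRec letters.toList bowl.toList

-- ===== PORT B =====
-- all(letter in bowl for letter in letters)
def search_bowl_alt (letters : String) (bowl : String) : Bool :=
  letters.toList.all (fun c => bowl.toList.contains c)

-- ===== PRECONDITION & SPEC =====
def Spec_search_bowl (letters : String) (bowl : String) (out : Bool) : Prop := out = search_bowl_alt letters bowl
instance (letters : String) (bowl : String) (out : Bool) : Decidable (Spec_search_bowl letters bowl out) := by unfold Spec_search_bowl; infer_instance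

-- ===== CLAIM (what is proved, stated in full; the proofs are below) =====
def Claim_equal_search_bowl : Prop := ∀ (letters : String) (bowl : String), Dom_search_bowl letters bowl → Spec_search_bowl letters bowl (search_bowl letters bowl)

-- ===== LEMMAS AND PROOFS =====

-- ===== VERDICT (by name: the statement is the Claim_ definition above) =====
theorem searchBowlRec_eq_all (letters bowl : List Char) :
    searchBowlRec letters bowl = letters.all (fun c => bowl.contains c) := by
  induction letters with
  | nil => rfl
  | cons c rest ih =>
      by_cases h : bowl.contains c = true <;>
        simp [searchBowlRec, List.all_cons, ih]

theorem search_bowl_spec : Claim_equal_search_bowl := by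
  intro letters bowl _
  unfold Spec_search_bowl search_bowl search_bowl_alt
  exact searchBowlRec_eq_all _ _
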